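-- pv_equiv track=rewrite | github.com/vercah/string-attractors | pseudostd_closure.py | get_clo_seq
-- ===== SOURCE A (Python) =====
-- from typing import Tuple
--
-- def get_clo_seq(user_arg: str) -> Tuple[list, int]:
--     period = 0
--     par = False
--     clo = []
--     for elem in user_arg:
--         if elem == 'R':
--             clo.append(0)
--         if elem == 'E':
--             clo.append(1)
--         if par:
--             period += 1
--         if(par == False and elem == '('):
--             par = True
--         # anything else will be ignored
--     return clo, period
-- ===== SOURCE B (Python) =====
-- from typing import Tuple
--
-- def get_clo_seq(user_arg: str) -> Tuple[list, int]:
--     clo = [0 if c == 'R' else 1 for c in user_arg if c in ('R', 'E')]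
--     idx = user_arg.find('(')
--     period = 0 if idx == -1 else len(user_arg) - idx - 1
--     return clo, period
-- ===== Notes on version B (the rewrite author's own statement) =====
-- stated objective: simpler
-- what changed: Replaces A's single stateful loop (flag plus running counter) by a filter/comprehension for clo plus a closed-form period: str.find locates the first open parenthesis and the period is the count of characters after it (0 if absent).
import Mathlib
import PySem

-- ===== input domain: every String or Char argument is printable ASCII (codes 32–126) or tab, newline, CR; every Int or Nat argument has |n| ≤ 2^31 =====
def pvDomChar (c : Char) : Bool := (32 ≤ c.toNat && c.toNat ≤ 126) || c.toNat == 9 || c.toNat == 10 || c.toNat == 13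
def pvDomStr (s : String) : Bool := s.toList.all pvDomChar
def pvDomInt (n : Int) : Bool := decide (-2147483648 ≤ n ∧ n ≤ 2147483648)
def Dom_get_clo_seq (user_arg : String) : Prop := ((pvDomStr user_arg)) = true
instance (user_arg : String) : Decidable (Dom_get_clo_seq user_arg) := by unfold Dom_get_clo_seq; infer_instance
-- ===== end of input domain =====

-- B replaces A's single stateful loop (flag + counter) by a filter for clo plus a
-- closed-form period from str.find; objective: simpler, same O(n) cost.


-- ===== PORT A =====
-- one loop step of A's for-loop over the state (clo, period, par), branches in Python order
def pvAStep (st : List Int × Int × Bool) (elem : Char) : List Int × Int × Bool :=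
  let clo := st.1; let period := st.2.1; let par := st.2.2
  let clo := if elem = 'R' then clo ++ [0] else clo
  let clo := if elem = 'E' then clo ++ [1] else clo
  let period := if par then period + 1 else period
  let par := if (!par) && elem = '(' then true else par
  (clo, period, par)

def get_clo_seq (user_arg : String) : List Int × Int :=
  let st := user_arg.toList.foldl pvAStep ([], 0, false)
  (st.1, st.2.1)

-- ===== PORT B =====
def get_clo_seq_alt (user_arg : String) : List Int × Int :=
  let clo := (user_arg.toList.filter (fun c => c = 'R' ∨ c = 'E')).map
               (fun c => if c = 'R' then (0 : Int) else 1)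
  let idx := PySem.Str.find user_arg "("
  let period : Int := if idx = -1 then 0 else PySem.Str.len user_arg - idx - 1
  (clo, period)

-- ===== PRECONDITION & SPEC =====
def Spec_get_clo_seq (user_arg : String) (out : List Int × Int) : Prop := out = get_clo_seq_alt user_arg
instance (user_arg : String) (out : List Int × Int) : Decidable (Spec_get_clo_seq user_arg out) := by unfold Spec_get_clo_seq; infer_instance

-- ===== CLAIM (what is proved, stated in full; the proofs are below) =====
def Claim_equal_get_clo_seq : Prop := ∀ (user_arg : String), Dom_get_clo_seq user_arg → Spec_get_clo_seq user_arg (get_clo_seq user_arg)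

-- ===== LEMMAS AND PROOFS =====

-- number of characters strictly after the first '(' (0 if no '(')
def pvPerOf : List Char → Int
  | [] => 0
  | c :: cs => if c = '(' then (cs.length : Int) else pvPerOf cs

theorem pvAStep_eq (clo : List Int) (p : Int) (par : Bool) (c : Char) :
    pvAStep (clo, p, par) c
      = ((if c = 'R' then clo ++ [0] else clo) ++ (if c = 'E' then [(1 : Int)] else []),
         (if par then p + 1 else p), (par || c = '(')) := by
  simp [pvAStep]
  constructor
  · split_ifs <;> simp
  · cases par <;> simp

-- closed form of A's fold from an arbitrary state
theorem pvA_fold (cs : List Char) : ∀ (clo : List Int) (p : Int) (par : Bool),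
    cs.foldl pvAStep (clo, p, par)
      = (clo ++ (cs.filter (fun c => decide (c = 'R' ∨ c = 'E'))).map
                  (fun c => if c = 'R' then (0 : Int) else 1),
         (if par then p + cs.length else p + pvPerOf cs),
         (par || cs.contains '(')) := by
  induction cs with
  | nil => intro clo p par; simp [pvPerOf]
  | cons c cs ih =>
    intro clo p par
    rw [List.foldl_cons, pvAStep_eq, ih]
    have hclo : (if c = 'R' then clo ++ [(0:Int)] else clo) ++ (if c = 'E' then [(1:Int)] else [])
        ++ (cs.filter (fun c => decide (c = 'R' ∨ c = 'E'))).map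
              (fun c => if c = 'R' then (0 : Int) else 1)
      = clo ++ ((c :: cs).filter (fun c => decide (c = 'R' ∨ c = 'E'))).map
              (fun c => if c = 'R' then (0 : Int) else 1) := by
      simp [List.filter_cons]
      split_ifs <;> simp_all
    cases par with
    | true =>
      refine Prod.ext ?_ (Prod.ext ?_ ?_)
      · simpa using hclo
      · simp; omega
      · simp
    | false =>
      refine Prod.ext ?_ (Prod.ext ?_ ?_)
      · simpa using hclo
      · by_cases hc : c = '(' <;> simp [pvPerOf, hc]
      · by_cases hc : c = '('
        · simp [hc]
        · simp [hc, Ne.symm hc]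

-- find.go never returns below its starting index (except the -1 failure value)
theorem pvGo_lb (cs : List Char) : ∀ (k : Nat),
    PySem.Chars.find.go ['('] cs k = -1 ∨ (k : Int) ≤ PySem.Chars.find.go ['('] cs k := by
  induction cs with
  | nil => intro k; left; simp [PySem.Chars.find.go]
  | cons c cs ih =>
    intro k
    by_cases hc : List.isPrefixOf ['('] (c :: cs)
    · right; simp [PySem.Chars.find.go, hc]
    · simp only [PySem.Chars.find.go, hc, if_false, Bool.false_eq_true]
      rcases ih (k + 1) with h | h
      · left; exact h
      · right; omega

-- shift rule for PySem.Chars.find.go on the pattern "("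
theorem pvGo_shift (cs : List Char) : ∀ (k : Nat),
    PySem.Chars.find.go ['('] cs k
      = if PySem.Chars.find.go ['('] cs 0 = -1 then -1
        else PySem.Chars.find.go ['('] cs 0 + k := by
  induction cs with
  | nil => intro k; simp [PySem.Chars.find.go]
  | cons c cs ih =>
    intro k
    by_cases hc : List.isPrefixOf ['('] (c :: cs)
    · simp [PySem.Chars.find.go, hc]
    · simp only [PySem.Chars.find.go, hc, if_false, Bool.false_eq_true]
      rw [show (0 + 1 : Nat) = 1 from rfl, show (k + 1 : Nat) = k + 1 from rfl,
          ih (k + 1), ih 1]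
      rcases pvGo_lb cs 0 with h | h <;> split_ifs <;> omega

-- B's find-based period equals pvPerOf
theorem pvFind_per (cs : List Char) :
    (if PySem.Chars.find cs ['('] = -1 then (0 : Int)
     else (cs.length : Int) - PySem.Chars.find cs ['('] - 1) = pvPerOf cs := by
  induction cs with
  | nil => simp [PySem.Chars.find, PySem.Chars.find.go, pvPerOf]
  | cons c cs ih =>
    by_cases hc : c = '('
    · subst hc
      have hpre : List.isPrefixOf ['('] ('(' :: cs) = true := by
        simp [List.isPrefixOf]
      simp [PySem.Chars.find, PySem.Chars.find.go, hpre, pvPerOf]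
    · have hpre : List.isPrefixOf ['('] (c :: cs) = false := by
        simp [List.isPrefixOf, Ne.symm hc]
      have hstep : PySem.Chars.find (c :: cs) ['('] = PySem.Chars.find.go ['('] cs 1 := by
        simp [PySem.Chars.find, PySem.Chars.find.go, hpre]
      have hfind : PySem.Chars.find.go ['('] cs 0 = PySem.Chars.find cs ['('] := rfl
      rw [hstep, pvGo_shift cs 1, hfind]
      have hper : pvPerOf (c :: cs) = pvPerOf cs := by simp [pvPerOf, hc]
      rw [hper, ← ih]
      by_cases hf : PySem.Chars.find cs ['('] = -1
      · simp [hf]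
      · have hlb := pvGo_lb cs 0
        rw [hfind] at hlb
        have h0 : (0 : Int) ≤ PySem.Chars.find cs ['('] := by tauto
        have h1 : ¬ (PySem.Chars.find cs ['('] + 1 = -1) := by omega
        simp only [hf, if_false]
        rw [if_neg (show ¬(PySem.Chars.find cs ['('] + (1:Nat) = -1) from by push_cast; omega)]
        simp only [List.length_cons]
        push_cast
        omega

-- ===== VERDICT (by name: the statement is the Claim_ definition above) =====
theorem get_clo_seq_spec : Claim_equal_get_clo_seq := by
  intro s _
  unfold Spec_get_clo_seq get_clo_seq get_clo_seq_alt
  rw [pvA_fold s.toList [] 0 false]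
  simp only [Bool.false_eq_true, if_false, List.nil_append, zero_add]
  refine Prod.ext rfl ?_
  have hfind : PySem.Str.find s "(" = PySem.Chars.find s.toList ['('] := by
    simp [PySem.Str.find]
  rw [show (PySem.Str.len s : Int) = (s.toList.length : Int) from by
        simp [PySem.Str.len_eq]]
  simp only [hfind]
  exact (pvFind_per s.toList).symm
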